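-- pv_equiv track=rewrite | github.com/wabrams14/mlb-pool | mlb_pool_tracker.py | build_tracker
-- ===== SOURCE A (Python) =====
-- from collections import defaultdict
--
-- def build_tracker(game_log):
--     team_runs = defaultdict(set)
--     first_to_score = {}
--
--     for gdate, away, ar, home, hr in game_log:
--         for team, runs, opp in [(away, ar, home), (home, hr, away)]:
--             if 0 <= runs <= 13:
--                 team_runs[team].add(runs)
--             if 0 <= runs <= 13 and runs not in first_to_score:
--                 first_to_score[runs] = (team, gdate, opp)
--
--     return dict(team_runs), first_to_score
-- ===== SOURCE B (Python) =====
-- def build_tracker(game_log):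
--     # Flatten games into one stream of qualifying scoring events
--     # (team, runs, opp, gdate), away side first, then group/index it.
--     events = [(team, runs, opp, gdate)
--               for gdate, away, ar, home, hr in game_log
--               for team, runs, opp in ((away, ar, home), (home, hr, away))
--               if 0 <= runs <= 13]
--     teams = list(dict.fromkeys(t for t, _, _, _ in events))
--     team_runs = {t: set(r for t2, r, _, _ in events if t2 == t) for t in teams}
--     run_vals = list(dict.fromkeys(r for _, r, _, _ in events))
--     first_to_score = {r: next((t2, g, o) for t2, r2, o, g in events if r2 == r)
--                       for r in run_vals}
--     return team_runs, first_to_score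
-- ===== Notes on version B (the rewrite author's own statement) =====
-- stated objective: alternative
-- what changed: Replaces the incremental dict-building loop (defaultdict of sets mutated per game, conditional first-write into first_to_score) by a flatten-then-group formulation: one comprehension flattens games into a stream of qualifying (team, runs, opp, gdate) events, then both result dicts are built declaratively by ordered-dedup of keys plus a per-key filter/first-match over that stream.
import Mathlib
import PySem

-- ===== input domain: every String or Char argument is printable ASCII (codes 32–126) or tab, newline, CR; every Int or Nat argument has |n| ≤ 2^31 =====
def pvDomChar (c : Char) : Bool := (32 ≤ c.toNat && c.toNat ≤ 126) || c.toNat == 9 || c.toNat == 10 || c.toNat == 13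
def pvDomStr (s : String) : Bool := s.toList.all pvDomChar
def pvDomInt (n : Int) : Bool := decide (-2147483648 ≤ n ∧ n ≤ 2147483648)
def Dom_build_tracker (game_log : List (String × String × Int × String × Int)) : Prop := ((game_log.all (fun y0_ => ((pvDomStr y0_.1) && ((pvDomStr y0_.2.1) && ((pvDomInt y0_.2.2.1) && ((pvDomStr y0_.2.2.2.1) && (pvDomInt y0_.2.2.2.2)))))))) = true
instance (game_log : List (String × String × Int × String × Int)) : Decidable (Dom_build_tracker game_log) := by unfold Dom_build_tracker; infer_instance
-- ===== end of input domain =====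

-- B replaces A's incremental dict-building loop by a flatten-then-group formulation
-- (one event stream, ordered dedup of keys, per-key filter / first match); same cost class,
-- objective: alternative decomposition. Equivalence of the RETURN values is proved below.

-- ===== PORT A =====
-- literal transliteration of A: one pass over game_log, inner loop over the two
-- (team, runs, opp) views of a game, mutating a defaultdict-of-sets and a
-- first-write-wins dict (dict → PySem.Dict, set → PySem.Set, defaultdict access → modify).
def build_tracker (game_log : List (String × String × Int × String × Int)) : (List (String × List Int)) × (List (Int × String × String × String)) :=
  let final : PySem.Dict String (PySem.Set Int) × PySem.Dict Int (String × String × String) :=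
    game_log.foldl
      (fun st g =>
        [(g.2.1, g.2.2.1, g.2.2.2.1), (g.2.2.2.1, g.2.2.2.2, g.2.1)].foldl
          (fun st2 e =>
            let team_runs :=
              if 0 ≤ e.2.1 ∧ e.2.1 ≤ 13 then st2.1.modify e.1 [] (fun s => PySem.Set.add s e.2.1) else st2.1
            let fts :=
              if (0 ≤ e.2.1 ∧ e.2.1 ≤ 13) ∧ st2.2.contains e.2.1 = false then st2.2.insert e.2.1 (e.1, g.1, e.2.2) else st2.2
            (team_runs, fts))
          st)
      (PySem.Dict.empty, PySem.Dict.empty)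
  (final.1.items, final.2.items)

-- ===== PORT B =====
-- B-side helpers (Source B's comprehensions, step for step)
-- the two (team, runs, opp) views of one game, away first
def pvGamePairs (g : String × String × Int × String × Int) : List (String × Int × String) :=
  [(g.2.1, g.2.2.1, g.2.2.2.1), (g.2.2.2.1, g.2.2.2.2, g.2.1)]

-- Source B's 'events' comprehension: qualifying (team, runs, opp, gdate) events
def pvEvents (game_log : List (String × String × Int × String × Int)) : List (String × Int × String × String) :=
  game_log.flatMap (fun g =>
    ((pvGamePairs g).filter (fun e => decide (0 ≤ e.2.1 ∧ e.2.1 ≤ 13))).map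
      (fun e => (e.1, e.2.1, e.2.2, g.1)))

-- the runs generator '(r for t2, r, _, _ in events if t2 == t)'
def pvRunsOf (events : List (String × Int × String × String)) (t : String) : List Int :=
  (events.filter (fun e => e.1 == t)).map (fun e => e.2.1)

-- 'next((t2, g, o) for t2, r2, o, g in events if r2 == r)'; the default is never
-- reached because r is drawn from the dedup of the events' run values
def pvFirstOf (events : List (String × Int × String × String)) (r : Int) : String × String × String :=
  match events.find? (fun e => e.2.1 == r) with
  | some e => (e.1, e.2.2.2, e.2.2.1)
  | none => ("", "", "")

def build_tracker_alt (game_log : List (String × String × Int × String × Int)) : (List (String × List Int)) × (List (Int × String × String × String)) :=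
  let events := pvEvents game_log
  let teams := PySem.List.dedup (events.map (fun e => e.1))
  let team_runs := teams.map (fun t => (t, PySem.Set.ofList (pvRunsOf events t)))
  let run_vals := PySem.List.dedup (events.map (fun e => e.2.1))
  let first_to_score := run_vals.map (fun r => (r, pvFirstOf events r))
  (team_runs, first_to_score)

-- ===== PRECONDITION & SPEC =====
def Spec_build_tracker (game_log : List (String × String × Int × String × Int)) (out : (List (String × List Int)) × (List (Int × String × String × String))) : Prop := out = build_tracker_alt game_log
instance (game_log : List (String × String × Int × String × Int)) (out : (List (String × List Int)) × (List (Int × String × String × String))) : Decidable (Spec_build_tracker game_log out) := by unfold Spec_build_tracker; infer_instance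

-- ===== CLAIM (what is proved, stated in full; the proofs are below) =====
def Claim_equal_build_tracker : Prop := ∀ (game_log : List (String × String × Int × String × Int)), Dom_build_tracker game_log → Spec_build_tracker game_log (build_tracker game_log)

-- ===== LEMMAS AND PROOFS =====

-- A's loop state, split and flattened (proof-only helpers)
def pvTrStep (d : PySem.Dict String (PySem.Set Int)) (e : String × Int × String × String) : PySem.Dict String (PySem.Set Int) :=
  d.modify e.1 [] (fun s => PySem.Set.add s e.2.1)

def pvFtsStep (d : PySem.Dict Int (String × String × String)) (e : String × Int × String × String) : PySem.Dict Int (String × String × String) :=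
  if d.contains e.2.1 then d else d.insert e.2.1 (e.1, e.2.2.2, e.2.2.1)

def pvTrG (d : PySem.Dict String (PySem.Set Int)) (e : String × Int × String × String) : PySem.Dict String (PySem.Set Int) :=
  if 0 ≤ e.2.1 ∧ e.2.1 ≤ 13 then pvTrStep d e else d

def pvFtsG (d : PySem.Dict Int (String × String × String)) (e : String × Int × String × String) : PySem.Dict Int (String × String × String) :=
  if (0 ≤ e.2.1 ∧ e.2.1 ≤ 13) ∧ d.contains e.2.1 = false then d.insert e.2.1 (e.1, e.2.2.2, e.2.2.1) else d

def pvQuads (g : String × String × Int × String × Int) : List (String × Int × String × String) :=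
  [(g.2.1, g.2.2.1, g.2.2.2.1, g.1), (g.2.2.2.1, g.2.2.2.2, g.2.1, g.1)]

theorem quads_filter (g : String × String × Int × String × Int) :
    (pvQuads g).filter (fun e => decide (0 ≤ e.2.1 ∧ e.2.1 ≤ 13)) =
      ((pvGamePairs g).filter (fun e => decide (0 ≤ e.2.1 ∧ e.2.1 ≤ 13))).map
        (fun e => (e.1, e.2.1, e.2.2, g.1)) := by
  by_cases h1 : 0 ≤ g.2.2.1 ∧ g.2.2.1 ≤ 13 <;>
    by_cases h2 : 0 ≤ g.2.2.2.2 ∧ g.2.2.2.2 ≤ 13 <;>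
      simp [pvQuads, pvGamePairs, h1, h2]

theorem flatMap_quads_filter (game_log : List (String × String × Int × String × Int)) :
    (game_log.flatMap pvQuads).filter (fun e => decide (0 ≤ e.2.1 ∧ e.2.1 ≤ 13)) = pvEvents game_log := by
  induction game_log with
  | nil => rfl
  | cons g tl ih =>
    simp only [List.flatMap_cons, List.filter_append, ih]
    unfold pvEvents
    simp only [List.flatMap_cons, quads_filter]

-- step 1: A's nested fold is the fold of the split steps over the flattened, filtered event stream
theorem buildA_eq (game_log : List (String × String × Int × String × Int)) :
    build_tracker game_log =
      (((pvEvents game_log).foldl pvTrStep PySem.Dict.empty).items,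
       ((pvEvents game_log).foldl pvFtsStep PySem.Dict.empty).items) := by
  have key : build_tracker game_log =
      (((game_log.foldl (fun st g => (pvQuads g).foldl (fun st2 e => (pvTrG st2.1 e, pvFtsG st2.2 e)) st)
          (PySem.Dict.empty, PySem.Dict.empty))).1.items,
       ((game_log.foldl (fun st g => (pvQuads g).foldl (fun st2 e => (pvTrG st2.1 e, pvFtsG st2.2 e)) st)
          (PySem.Dict.empty, PySem.Dict.empty))).2.items) := rfl
  rw [key, ← List.foldl_flatMap, PySem.List.foldl_prod_mk]
  have e1 : List.foldl pvTrG PySem.Dict.empty (game_log.flatMap pvQuads) =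
      List.foldl pvTrStep PySem.Dict.empty
        ((game_log.flatMap pvQuads).filter (fun e => decide (0 ≤ e.2.1 ∧ e.2.1 ≤ 13))) :=
    PySem.List.foldl_ite_eq_foldl_filter
      (fun e : String × Int × String × String => 0 ≤ e.2.1 ∧ e.2.1 ≤ 13) pvTrStep
      (game_log.flatMap pvQuads) PySem.Dict.empty
  have e2a : List.foldl pvFtsG PySem.Dict.empty (game_log.flatMap pvQuads) =
      List.foldl (fun d e => if 0 ≤ e.2.1 ∧ e.2.1 ≤ 13 then pvFtsStep d e else d)
        PySem.Dict.empty (game_log.flatMap pvQuads) := by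
    apply PySem.List.foldl_congr_mem
    intro acc x _
    by_cases hp : 0 ≤ x.2.1 ∧ x.2.1 ≤ 13 <;> cases hc : acc.contains x.2.1 <;>
      simp [pvFtsG, pvFtsStep, hp, hc]
  have e2 : List.foldl (fun d e => if 0 ≤ e.2.1 ∧ e.2.1 ≤ 13 then pvFtsStep d e else d)
      PySem.Dict.empty (game_log.flatMap pvQuads) =
      List.foldl pvFtsStep PySem.Dict.empty
        ((game_log.flatMap pvQuads).filter (fun e => decide (0 ≤ e.2.1 ∧ e.2.1 ≤ 13))) :=
    PySem.List.foldl_ite_eq_foldl_filter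
      (fun e : String × Int × String × String => 0 ≤ e.2.1 ∧ e.2.1 ≤ 13) pvFtsStep
      (game_log.flatMap pvQuads) PySem.Dict.empty
  rw [e1, e2a, e2, flatMap_quads_filter]

-- predicate/filter bookkeeping on deduplicated key lists
theorem filter_discard_of_neg {α : Type} [BEq α] [LawfulBEq α] (M : List α) (k : α) (p : α → Bool)
    (hk : p k = false) :
    List.filter p ((PySem.Set.ofList M).discard k) = List.filter p (PySem.Set.ofList M) := by
  rw [PySem.Set.discard.eq_1, List.filter_filter]
  apply List.filter_congr
  intro x _
  cases hpx : p x
  · simp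
  · have hne : x ≠ k := by rintro rfl; rw [hpx] at hk; cases hk
    simp [hne]

theorem filter_discard_and {α : Type} [BEq α] [LawfulBEq α] (M : List α) (k : α) (p : α → Bool) :
    List.filter p ((PySem.Set.ofList M).discard k) =
      List.filter (fun y => !(y == k) && p y) (PySem.Set.ofList M) := by
  rw [PySem.Set.discard.eq_1, List.filter_filter]
  apply List.filter_congr
  intro x _
  exact Bool.and_comm _ _

theorem pvFirstOf_cons_ne (e : String × Int × String × String)
    (evs : List (String × Int × String × String)) (r : Int) (h : r ≠ e.2.1) :
    pvFirstOf (e :: evs) r = pvFirstOf evs r := by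
  unfold pvFirstOf
  rw [List.find?_cons_of_neg]
  simp [Ne.symm h]

theorem pvFirstOf_cons_self (e : String × Int × String × String)
    (evs : List (String × Int × String × String)) :
    pvFirstOf (e :: evs) e.2.1 = (e.1, e.2.2.2, e.2.2.1) := by
  unfold pvFirstOf
  rw [List.find?_cons_of_pos]
  all_goals simp

theorem pvRunsOf_cons_ne (e : String × Int × String × String)
    (evs : List (String × Int × String × String)) (t : String) (h : t ≠ e.1) :
    pvRunsOf (e :: evs) t = pvRunsOf evs t := by
  unfold pvRunsOf
  rw [List.filter_cons_of_neg]
  simp [Ne.symm h]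

theorem pvRunsOf_cons_self (e : String × Int × String × String)
    (evs : List (String × Int × String × String)) :
    pvRunsOf (e :: evs) e.1 = e.2.1 :: pvRunsOf evs e.1 := by
  unfold pvRunsOf
  rw [List.filter_cons_of_pos]
  all_goals simp

-- step 2: closed form of the first_to_score fold
theorem fts_fold (events : List (String × Int × String × String)) :
    ∀ (d : PySem.Dict Int (String × String × String)), d.keys.Nodup →
      (events.foldl pvFtsStep d).items =
        d.items ++
          ((PySem.Set.ofList (events.map (fun e => e.2.1))).filter (fun r => !d.contains r)).map
            (fun r => (r, pvFirstOf events r)) := by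
  induction events with
  | nil => intro d _; simp [PySem.Set.ofList_nil]
  | cons e evs ih =>
    intro d hnd
    rw [List.foldl_cons]
    cases hc : d.contains e.2.1 with
    | true =>
      have hstep : pvFtsStep d e = d := by simp [pvFtsStep, hc]
      rw [hstep, ih d hnd]
      congr 1
      rw [List.map_cons, PySem.Set.ofList_cons, List.filter_cons]
      simp only [hc, Bool.not_true]
      rw [filter_discard_of_neg _ _ _ (by simp [hc])]
      apply List.map_congr_left
      intro r hr
      have hmem := (List.mem_filter.mp hr).2
      have hrne : r ≠ e.2.1 := by
        rintro rfl; rw [hc] at hmem; simp at hmem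
      rw [pvFirstOf_cons_ne _ _ _ hrne]
    | false =>
      have hstep : pvFtsStep d e = d.insert e.2.1 (e.1, e.2.2.2, e.2.2.1) := by
        simp [pvFtsStep, hc]
      rw [hstep, ih _ (PySem.Dict.nodup_keys_insert _ _ _ hnd),
        PySem.Dict.items_insert_of_not_contains _ _ hc]
      rw [List.map_cons, PySem.Set.ofList_cons, List.filter_cons]
      simp only [hc, Bool.not_false, if_true]
      rw [List.map_cons, pvFirstOf_cons_self]
      rw [filter_discard_and]
      have hfil : List.filter (fun r => !(d.insert e.2.1 (e.1, e.2.2.2, e.2.2.1)).contains r)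
          (PySem.Set.ofList (evs.map (fun e => e.2.1))) =
          List.filter (fun y => !(y == e.2.1) && !d.contains y)
            (PySem.Set.ofList (evs.map (fun e => e.2.1))) := by
        apply List.filter_congr
        intro x _
        rw [PySem.Dict.contains_insert]
        simp
      rw [hfil]
      have hmap : List.map (fun r => (r, pvFirstOf evs r))
          (List.filter (fun y => !(y == e.2.1) && !d.contains y)
            (PySem.Set.ofList (evs.map (fun e => e.2.1)))) =
          List.map (fun r => (r, pvFirstOf (e :: evs) r))
            (List.filter (fun y => !(y == e.2.1) && !d.contains y)
              (PySem.Set.ofList (evs.map (fun e => e.2.1)))) := by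
        apply List.map_congr_left
        intro r hr
        have := (List.mem_filter.mp hr).2
        have hrne : r ≠ e.2.1 := by
          intro h; subst h; simp at this
        rw [pvFirstOf_cons_ne _ _ _ hrne]
      rw [hmap]
      simp [List.append_assoc]

-- step 3: closed form of the team_runs fold
theorem tr_fold (events : List (String × Int × String × String)) :
    ∀ (d : PySem.Dict String (PySem.Set Int)), d.keys.Nodup →
      (events.foldl pvTrStep d).items =
        d.items.map (fun p => (p.1, PySem.Set.update p.2 (pvRunsOf events p.1))) ++
          ((PySem.Set.ofList (events.map (fun e => e.1))).filter (fun t => !d.contains t)).map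
            (fun t => (t, PySem.Set.ofList (pvRunsOf events t))) := by
  induction events with
  | nil =>
    intro d _
    simp [pvRunsOf, PySem.Set.update_nil, PySem.Set.ofList_nil]
  | cons e evs ih =>
    intro d hnd
    rw [List.foldl_cons]
    have hstep : pvTrStep d e = d.insert e.1 (PySem.Set.add (d.getD e.1 []) e.2.1) := rfl
    have hnd' : (d.insert e.1 (PySem.Set.add (d.getD e.1 []) e.2.1)).keys.Nodup :=
      PySem.Dict.nodup_keys_insert _ _ _ hnd
    rw [hstep, ih _ hnd']
    cases hc : d.contains e.1 with
    | true =>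
      rw [PySem.Dict.items_insert_of_contains _ _ hc]
      congr 1
      · -- existing-items part
        rw [List.map_map]
        apply List.map_congr_left
        intro p hp
        by_cases hpk : p.1 = e.1
        · have hpd : (e.1, p.2) ∈ d.items := by
            have : p = (e.1, p.2) := by rw [← hpk]
            rw [← this]; exact hp
          have hget : d.getD e.1 [] = p.2 := PySem.Dict.getD_of_mem_items d hpd hnd []
          simp only [Function.comp, hpk, beq_self_eq_true, if_true]
          rw [hget]
          have : PySem.Set.update (PySem.Set.add p.2 e.2.1) (pvRunsOf evs e.1) =
              PySem.Set.update p.2 (e.2.1 :: pvRunsOf evs e.1) := (PySem.Set.update_cons _ _ _).symm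
          rw [this, ← pvRunsOf_cons_self]
        · have hbf : (p.1 == e.1) = false := by simp [hpk]
          simp [Function.comp, hbf, pvRunsOf_cons_ne _ _ _ hpk]
      · -- fresh-teams part
        rw [List.map_cons, PySem.Set.ofList_cons, List.filter_cons]
        simp only [hc, Bool.not_true]
        rw [filter_discard_of_neg _ _ _ (by simp [hc])]
        have hfil : List.filter (fun t => !(d.insert e.1 (PySem.Set.add (d.getD e.1 []) e.2.1)).contains t)
            (PySem.Set.ofList (evs.map (fun e => e.1))) =
            List.filter (fun t => !d.contains t) (PySem.Set.ofList (evs.map (fun e => e.1))) := by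
          apply List.filter_congr
          intro x _
          rw [PySem.Dict.contains_insert]
          cases hx : d.contains x
          · have hxne : x ≠ e.1 := by rintro rfl; rw [hc] at hx; cases hx
            simp [hxne]
          · simp
        rw [hfil]
        apply List.map_congr_left
        intro t ht
        have hmem := (List.mem_filter.mp ht).2
        have htne : t ≠ e.1 := by
          rintro rfl; rw [hc] at hmem; simp at hmem
        rw [pvRunsOf_cons_ne _ _ _ htne]
    | false =>
      rw [PySem.Dict.items_insert_of_not_contains _ _ hc]
      rw [PySem.Dict.getD_of_not_contains _ _ hc]
      have hadd : PySem.Set.add ([] : PySem.Set Int) e.2.1 = [e.2.1] :=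
        PySem.Set.add_of_not_mem (by simp)
      rw [hadd, List.map_append]
      have hfil : List.filter (fun t => !(d.insert e.1 ([e.2.1] : PySem.Set Int)).contains t)
          (PySem.Set.ofList (evs.map (fun e => e.1))) =
          List.filter (fun y => !(y == e.1) && !d.contains y)
            (PySem.Set.ofList (evs.map (fun e => e.1))) := by
        apply List.filter_congr
        intro x _
        rw [PySem.Dict.contains_insert]
        simp
      rw [hfil]
      have hsing : List.map (fun p => (p.1, PySem.Set.update p.2 (pvRunsOf evs p.1)))
          [(e.1, ([e.2.1] : PySem.Set Int))] = [(e.1, PySem.Set.ofList (pvRunsOf (e :: evs) e.1))] := by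
        simp only [List.map_cons, List.map_nil]
        rw [← PySem.Set.ofList_cons_eq_update, ← pvRunsOf_cons_self]
      rw [hsing]
      have hmap1 : List.map (fun p => (p.1, PySem.Set.update p.2 (pvRunsOf evs p.1))) d.items =
          List.map (fun p => (p.1, PySem.Set.update p.2 (pvRunsOf (e :: evs) p.1))) d.items := by
        apply List.map_congr_left
        intro p hp
        have hkey : p.1 ∈ d.keys := PySem.Dict.mem_keys_of_mem_items d hp
        have hcp : d.contains p.1 = true := (PySem.Dict.contains_iff_mem_keys d p.1).mpr hkey
        have hpne : p.1 ≠ e.1 := by rintro h; rw [h, hc] at hcp; cases hcp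
        rw [pvRunsOf_cons_ne _ _ _ hpne]
      have hmap2 : List.map (fun t => (t, PySem.Set.ofList (pvRunsOf evs t)))
          (List.filter (fun y => !(y == e.1) && !d.contains y)
            (PySem.Set.ofList (evs.map (fun e => e.1)))) =
          List.map (fun t => (t, PySem.Set.ofList (pvRunsOf (e :: evs) t)))
            (List.filter (fun y => !(y == e.1) && !d.contains y)
              (PySem.Set.ofList (evs.map (fun e => e.1)))) := by
        apply List.map_congr_left
        intro t ht
        have := (List.mem_filter.mp ht).2
        have htne : t ≠ e.1 := by intro h; subst h; simp at this
        rw [pvRunsOf_cons_ne _ _ _ htne]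
      rw [hmap1, hmap2]
      have hr : List.filter (fun t => !d.contains t)
          (PySem.Set.ofList ((e :: evs).map (fun e => e.1))) =
          e.1 :: List.filter (fun y => !(y == e.1) && !d.contains y)
            (PySem.Set.ofList (evs.map (fun e => e.1))) := by
        rw [List.map_cons, PySem.Set.ofList_cons, List.filter_cons,
          if_pos (show (!d.contains e.1) = true by simp [hc]), filter_discard_and]
      rw [hr, List.map_cons]
      simp [List.append_assoc]

-- ===== VERDICT (by name: the statement is the Claim_ definition above) =====
theorem build_tracker_spec : Claim_equal_build_tracker := by
  intro game_log _
  show build_tracker game_log = build_tracker_alt game_log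
  rw [buildA_eq, tr_fold _ _ PySem.Dict.nodup_keys_empty, fts_fold _ _ PySem.Dict.nodup_keys_empty]
  simp [build_tracker_alt, PySem.List.dedup_eq_ofList, PySem.Dict.contains_empty,
    show (PySem.Dict.empty : PySem.Dict String (PySem.Set Int)).items = [] from rfl,
    show (PySem.Dict.empty : PySem.Dict Int (String × String × String)).items = [] from rfl,
    List.filter_true]
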